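-- pv_equiv track=rewrite | github.com/Maulexis/Darnex | railway-ai/track_monitoring_integration.py | calculate_system_status
-- ===== SOURCE A (Python) =====
-- def calculate_system_status(track_status, incidents, decisions):
--     """Calculate overall system safety status"""
--     critical_decisions = len([d for d in decisions if d['priority'] == 'CRITICAL'])
--     blocked_tracks = len([t for t in track_status.values() if t['status'] == 'BLOCKED'])
--
--     if critical_decisions > 5 or blocked_tracks > 10:
--         return 'CRITICAL'
--     elif critical_decisions > 2 or blocked_tracks > 5:
--         return 'WARNING'
--     elif critical_decisions > 0 or blocked_tracks > 0:
--         return 'CAUTION'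
--     else:
--         return 'NORMAL'
-- ===== SOURCE B (Python) =====
-- # B: streaming escalation -- walk each collection once, upgrading the status string the
-- # moment a running count crosses a threshold, with early exit once CRITICAL is reached.
-- _RANK = {'NORMAL': 0, 'CAUTION': 1, 'WARNING': 2, 'CRITICAL': 3}
-- _DEC_STEP = {1: 'CAUTION', 3: 'WARNING', 6: 'CRITICAL'}
-- _TRK_STEP = {1: 'CAUTION', 6: 'WARNING', 11: 'CRITICAL'}
--
-- def _bump(status, n, steps):
--     n += 1
--     s = steps.get(n)
--     if s and _RANK[s] > _RANK[status]:
--         status = s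
--     return status, n
--
-- def calculate_system_status(track_status, incidents, decisions):
--     status, n = 'NORMAL', 0
--     for d in decisions:
--         if d['priority'] == 'CRITICAL':
--             status, n = _bump(status, n, _DEC_STEP)
--     n = 0
--     for t in track_status.values():
--         if status == 'CRITICAL':
--             break
--         if t['status'] == 'BLOCKED':
--             status, n = _bump(status, n, _TRK_STEP)
--     return status
-- ===== Notes on version B (the rewrite author's own statement) =====
-- stated objective: alternative
-- what changed: Replaces count-then-threshold (two filtered counts fed into an if/elif ladder) by a streaming escalation: single passes that upgrade a running status string the moment a count crosses a threshold, with early exit from the track loop once CRITICAL is reached.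
import Mathlib
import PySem

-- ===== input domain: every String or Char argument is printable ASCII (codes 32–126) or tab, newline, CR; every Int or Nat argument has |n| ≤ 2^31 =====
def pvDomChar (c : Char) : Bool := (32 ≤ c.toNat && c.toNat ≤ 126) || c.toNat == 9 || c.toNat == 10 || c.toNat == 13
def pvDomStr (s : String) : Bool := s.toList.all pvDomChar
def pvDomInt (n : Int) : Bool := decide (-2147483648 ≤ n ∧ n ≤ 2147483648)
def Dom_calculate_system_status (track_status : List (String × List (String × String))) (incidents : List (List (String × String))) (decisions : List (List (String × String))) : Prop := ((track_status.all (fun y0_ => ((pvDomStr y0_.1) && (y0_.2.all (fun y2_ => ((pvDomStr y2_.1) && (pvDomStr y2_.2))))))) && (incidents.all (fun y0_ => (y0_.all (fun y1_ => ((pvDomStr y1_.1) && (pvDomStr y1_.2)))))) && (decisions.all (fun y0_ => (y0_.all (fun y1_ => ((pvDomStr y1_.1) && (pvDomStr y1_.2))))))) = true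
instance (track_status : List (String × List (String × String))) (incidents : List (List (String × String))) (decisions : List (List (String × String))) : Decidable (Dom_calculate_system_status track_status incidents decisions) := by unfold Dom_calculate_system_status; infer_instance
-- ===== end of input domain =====

-- B replaces count-then-threshold by a streaming escalation (upgrade the status the moment a
-- running count crosses a threshold, early exit at CRITICAL); same asymptotic cost.

-- ===== PORT A =====
def calculate_system_status (track_status : List (String × List (String × String))) (incidents : List (List (String × String))) (decisions : List (List (String × String))) : String :=
  let critical_decisions : Int :=
    ((decisions.filter (fun d => (PySem.Dict.mk d).get? "priority" == some "CRITICAL")).length : Int)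
  let blocked_tracks : Int :=
    (((track_status.map Prod.snd).filter (fun t => (PySem.Dict.mk t).get? "status" == some "BLOCKED")).length : Int)
  if critical_decisions > 5 ∨ blocked_tracks > 10 then "CRITICAL"
  else if critical_decisions > 2 ∨ blocked_tracks > 5 then "WARNING"
  else if critical_decisions > 0 ∨ blocked_tracks > 0 then "CAUTION"
  else "NORMAL"

-- ===== PORT B =====
def pvRankD : PySem.Dict String Int :=
  PySem.Dict.mk [("NORMAL", 0), ("CAUTION", 1), ("WARNING", 2), ("CRITICAL", 3)]
def pvDecStep : PySem.Dict Int String :=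
  PySem.Dict.mk [(1, "CAUTION"), (3, "WARNING"), (6, "CRITICAL")]
def pvTrkStep : PySem.Dict Int String :=
  PySem.Dict.mk [(1, "CAUTION"), (6, "WARNING"), (11, "CRITICAL")]

-- _RANK[s]: every status reaching this lookup is one of the four keys, so the KeyError
-- branch is unreachable; .getD 0 is that unreachable default.
def pvBump (status : String) (n : Int) (steps : PySem.Dict Int String) : String × Int :=
  match steps.get? (n + 1) with
  | some s => if (pvRankD.get? s).getD 0 > (pvRankD.get? status).getD 0 then (s, n + 1) else (status, n + 1)
  | none => (status, n + 1)

def calculate_system_status_alt (track_status : List (String × List (String × String))) (incidents : List (List (String × String))) (decisions : List (List (String × String))) : String :=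
  let st1 : String × Int :=
    decisions.foldl (fun acc d =>
      if (PySem.Dict.mk d).get? "priority" == some "CRITICAL" then
        pvBump acc.1 acc.2 pvDecStep
      else acc) ("NORMAL", 0)
  let st2 : String × Int :=
    (track_status.map Prod.snd).foldl (fun acc t =>
      if acc.1 == "CRITICAL" then acc        -- Python 'break': state frozen after CRITICAL
      else if (PySem.Dict.mk t).get? "status" == some "BLOCKED" then
        pvBump acc.1 acc.2 pvTrkStep
      else acc) (st1.1, 0)
  st2.1

-- ===== PRECONDITION & SPEC =====
-- Pre_ excludes exactly the inputs where A raises KeyError: a decision without a 'priority'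
-- key or a track-status value without a 'status' key.
def Pre_calculate_system_status (track_status : List (String × List (String × String))) (incidents : List (List (String × String))) (decisions : List (List (String × String))) : Prop :=
  (decisions.all (fun d => (PySem.Dict.mk d).contains "priority")
    && track_status.all (fun t => (PySem.Dict.mk t.2).contains "status")) = true
instance (track_status : List (String × List (String × String))) (incidents : List (List (String × String))) (decisions : List (List (String × String))) : Decidable (Pre_calculate_system_status track_status incidents decisions) := by unfold Pre_calculate_system_status; infer_instance

def pvWitness_calculate_system_status : (List (String × List (String × String))) × (List (List (String × String))) × (List (List (String × String))) :=
  ([("T1", [("status", "BLOCKED")])], [], [[("priority", "CRITICAL")]])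

def Spec_calculate_system_status (track_status : List (String × List (String × String))) (incidents : List (List (String × String))) (decisions : List (List (String × String))) (out : String) : Prop := out = calculate_system_status_alt track_status incidents decisions
instance (track_status : List (String × List (String × String))) (incidents : List (List (String × String))) (decisions : List (List (String × String))) (out : String) : Decidable (Spec_calculate_system_status track_status incidents decisions out) := by unfold Spec_calculate_system_status; infer_instance

-- ===== CLAIM =====
def Claim_equal_calculate_system_status : Prop := ∀ (track_status : List (String × List (String × String))) (incidents : List (List (String × String))) (decisions : List (List (String × String))), Dom_calculate_system_status track_status incidents decisions → Pre_calculate_system_status track_status incidents decisions → Spec_calculate_system_status track_status incidents decisions (calculate_system_status track_status incidents decisions)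

-- ===== LEMMAS AND PROOFS =====

def pvSt (c m : Int) : String :=
  if c > 5 ∨ m > 10 then "CRITICAL"
  else if c > 2 ∨ m > 5 then "WARNING"
  else if c > 0 ∨ m > 0 then "CAUTION"
  else "NORMAL"
theorem decstep_get (n : Int) : pvDecStep.get? n =
    if n = 1 then some "CAUTION" else if n = 3 then some "WARNING" else if n = 6 then some "CRITICAL" else none := by
  by_cases h1 : n = 1
  · subst h1; decide
  by_cases h3 : n = 3
  · subst h3; decide
  by_cases h6 : n = 6
  · subst h6; decide
  rw [if_neg h1, if_neg h3, if_neg h6]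
  simp [pvDecStep, beq_iff_eq, Ne.symm h1, Ne.symm h3, Ne.symm h6, PySem.Dict.get?]
theorem trkstep_get (n : Int) : pvTrkStep.get? n =
    if n = 1 then some "CAUTION" else if n = 6 then some "WARNING" else if n = 11 then some "CRITICAL" else none := by
  by_cases h1 : n = 1
  · subst h1; decide
  by_cases h6 : n = 6
  · subst h6; decide
  by_cases h11 : n = 11
  · subst h11; decide
  rw [if_neg h1, if_neg h6, if_neg h11]
  simp [pvTrkStep, beq_iff_eq, Ne.symm h1, Ne.symm h6, Ne.symm h11, PySem.Dict.get?]
theorem bump_dec (k : Int) (hk : 0 ≤ k) : pvBump (pvSt k 0) k pvDecStep = (pvSt (k + 1) 0, k + 1) := by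
  unfold pvBump
  rw [decstep_get]
  unfold pvSt
  split_ifs <;> simp_all [pvRankD, PySem.Dict.get?_mk_cons] <;> omega
theorem bump_trk (c m : Int) (hm : 0 ≤ m) : pvBump (pvSt c m) m pvTrkStep = (pvSt c (m + 1), m + 1) := by
  unfold pvBump
  rw [trkstep_get]
  unfold pvSt
  split_ifs <;> simp_all [pvRankD, PySem.Dict.get?_mk_cons] <;> omega
theorem loop1_inv (l : List (List (String × String))) (k : Int) (hk : 0 ≤ k) :
    l.foldl (fun acc d =>
      if (PySem.Dict.mk d).get? "priority" == some "CRITICAL" then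
        pvBump acc.1 acc.2 pvDecStep
      else acc) (pvSt k 0, k)
    = (pvSt (k + ((l.filter (fun d => (PySem.Dict.mk d).get? "priority" == some "CRITICAL")).length : Int)) 0,
       k + ((l.filter (fun d => (PySem.Dict.mk d).get? "priority" == some "CRITICAL")).length : Int)) := by
  induction l generalizing k with
  | nil => simp
  | cons x xs ih =>
    rw [List.foldl_cons, List.filter_cons]
    cases h : ((PySem.Dict.mk x).get? "priority" == some "CRITICAL") with
    | false => simpa [h] using ih k hk
    | true =>
      simp only [if_true, bump_dec k hk, ih (k + 1) (by omega), List.length_cons]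
      simp only [Prod.mk.injEq]
      refine ⟨by congr 1; push_cast; ring, by push_cast; ring⟩
theorem loop2_frozen (l : List (List (String × String))) (st : String × Int) (h : st.1 = "CRITICAL") :
    l.foldl (fun acc t =>
      if acc.1 == "CRITICAL" then acc
      else if (PySem.Dict.mk t).get? "status" == some "BLOCKED" then
        pvBump acc.1 acc.2 pvTrkStep
      else acc) st = st := by
  induction l with
  | nil => rfl
  | cons x xs ih => rw [List.foldl_cons, if_pos (by simp [h])]; exact ih
theorem st_mono_critical (c m m' : Int) (h : pvSt c m = "CRITICAL") (hle : m ≤ m') :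
    pvSt c m' = "CRITICAL" := by
  unfold pvSt at *; split_ifs at h ⊢ <;> simp_all <;> omega
theorem loop2_inv (c : Int) (l : List (List (String × String))) (m : Int) (hm : 0 ≤ m) :
    (l.foldl (fun acc t =>
      if acc.1 == "CRITICAL" then acc
      else if (PySem.Dict.mk t).get? "status" == some "BLOCKED" then
        pvBump acc.1 acc.2 pvTrkStep
      else acc) (pvSt c m, m)).1
    = pvSt c (m + ((l.filter (fun t => (PySem.Dict.mk t).get? "status" == some "BLOCKED")).length : Int)) := by
  induction l generalizing m with
  | nil => simp
  | cons x xs ih =>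
    by_cases hc : pvSt c m = "CRITICAL"
    · rw [loop2_frozen _ _ hc]
      show pvSt c m = _
      rw [hc]
      exact (st_mono_critical c m _ hc (le_add_of_nonneg_right (Int.natCast_nonneg _))).symm
    · rw [List.foldl_cons, List.filter_cons, if_neg (by simp [hc])]
      cases h : ((PySem.Dict.mk x).get? "status" == some "BLOCKED") with
      | false => simpa [h] using ih m hm
      | true =>
        simp only [if_true, bump_trk c m hm, ih (m + 1) (by omega), List.length_cons]
        congr 1; push_cast; ring

-- ===== VERDICT =====
theorem calculate_system_status_spec : Claim_equal_calculate_system_status := by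
  intro ts inc dec _ _
  unfold Spec_calculate_system_status calculate_system_status calculate_system_status_alt
  have h0 : pvSt 0 0 = "NORMAL" := by unfold pvSt; norm_num
  have h1 := loop1_inv dec 0 le_rfl
  rw [h0] at h1
  rw [h1]
  have h2 := loop2_inv
    ((dec.filter (fun d => (PySem.Dict.mk d).get? "priority" == some "CRITICAL")).length : Int)
    (ts.map Prod.snd) 0 le_rfl
  simp only [zero_add] at h1 h2 ⊢
  rw [h2]
  unfold pvSt
  rfl
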